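-- pv_equiv track=rewrite | github.com/Ton-IO-S3r/Practice_Exercises | python/back_odoo.py | countVowelsValueRecursive
-- ===== SOURCE A (Python) =====
-- def countVowelsValueRecursive(phrase):
--   vowels_arr=['a','e','i','o','u']
--
--   phrase=phrase.lower()
--   if len(phrase) > 1:
--     if phrase[0] in vowels_arr:
--
--       return countVowelsValueRecursive(phrase[1:]) + vowels_arr.index(phrase[0])+1
--     else:
--       return countVowelsValueRecursive(phrase[1:])
--
--   else:
--     if phrase[0] in vowels_arr:
--       return vowels_arr.index(phrase[0])+1
--     else:
--       return 0
-- ===== SOURCE B (Python) =====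
-- def countVowelsValueRecursive(phrase):
--     values = {'a': 1, 'e': 2, 'i': 3, 'o': 4, 'u': 5}
--     total = 0
--     for ch in phrase.lower():
--         total += values.get(ch, 0)
--     return total
-- ===== Notes on version B (the rewrite author's own statement) =====
-- stated objective: faster
-- what changed: Replaces the head/tail recursion, which re-lowercases and re-slices the remaining suffix and scans the vowel list at each call, by a single iterative pass over the once-lowercased string accumulating each character's value from a vowel->value dict.
-- crash fix: On the empty string A raises IndexError (phrase[0]); B returns 0, the natural sum over no characters. — e.g. on countVowelsValueRecursive(""): A raises IndexError, B returns 0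
import Mathlib
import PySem

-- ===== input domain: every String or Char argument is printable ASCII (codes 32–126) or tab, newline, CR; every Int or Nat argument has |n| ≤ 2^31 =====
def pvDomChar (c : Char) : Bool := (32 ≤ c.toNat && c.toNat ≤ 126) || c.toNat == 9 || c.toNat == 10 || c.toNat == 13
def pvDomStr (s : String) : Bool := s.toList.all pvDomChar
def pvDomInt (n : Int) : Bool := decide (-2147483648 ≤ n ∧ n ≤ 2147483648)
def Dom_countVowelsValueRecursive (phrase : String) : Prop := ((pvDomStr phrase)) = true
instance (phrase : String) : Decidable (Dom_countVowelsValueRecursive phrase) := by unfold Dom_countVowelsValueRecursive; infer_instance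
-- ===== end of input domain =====

-- B replaces A's head/tail recursion (which re-lowercases the suffix and scans the vowel list at each
-- call) by one iterative pass over the once-lowercased string with a vowel→value dict; on the empty
-- string A raises IndexError while B returns 0 (see Raises_).

-- ===== PORT A =====
-- vowels_arr = ['a','e','i','o','u']
def pvVowelsArr : List Char := ['a', 'e', 'i', 'o', 'u']

-- length is preserved by .lower(); cited by the termination proof of pvGoA
theorem pv_length_lower (cs : List Char) : (PySem.Chars.lower cs).length = cs.length := by
  simp [PySem.Chars.lower]

-- the body of A on the character list; A lowercases `phrase` at each call (as the Python does),
-- then branches on len > 1; the [] case is Python's IndexError on phrase[0] (excluded by Pre_)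
def pvGoA (cs : List Char) : Int :=
  match h : PySem.Chars.lower cs with
  | [] => 0  -- Python: phrase[0] raises IndexError here; unreachable under Pre_
  | c :: rest =>
    if 1 < (c :: rest).length then
      if pvVowelsArr.contains c then
        pvGoA rest + ((PySem.List.index? pvVowelsArr c).getD 0 : Int) + 1
      else
        pvGoA rest
    else
      if pvVowelsArr.contains c then ((PySem.List.index? pvVowelsArr c).getD 0 : Int) + 1
      else 0
termination_by cs.length
decreasing_by
  all_goals
  have := congrArg List.length h
  rw [pv_length_lower] at this
  simp at this
  omega

def countVowelsValueRecursive (phrase : String) : Int := pvGoA phrase.toList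

-- ===== PORT B =====
-- values = {'a':1,'e':2,'i':3,'o':4,'u':5}
def pvVals : PySem.Dict Char Int :=
  PySem.Dict.ofList [('a', 1), ('e', 2), ('i', 3), ('o', 4), ('u', 5)]

def countVowelsValueRecursive_alt (phrase : String) : Int :=
  (PySem.Str.lower phrase).toList.foldl (fun total ch => total + PySem.Dict.getD pvVals ch 0) 0

-- ===== PRECONDITION & SPEC =====
-- Pre_ excludes only the empty string, on which A raises IndexError (phrase[0])
def Pre_countVowelsValueRecursive (phrase : String) : Prop := phrase ≠ ""
instance (phrase : String) : Decidable (Pre_countVowelsValueRecursive phrase) := by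
  unfold Pre_countVowelsValueRecursive; infer_instance

def pvWitness_countVowelsValueRecursive : String := "Idea"

-- On the empty string A raises IndexError (phrase[0] on ""); B returns 0, the sum over no characters.
def Raises_countVowelsValueRecursive (phrase : String) : Prop := phrase = ""
instance (phrase : String) : Decidable (Raises_countVowelsValueRecursive phrase) := by
  unfold Raises_countVowelsValueRecursive; infer_instance
def pvRaiseWitness_countVowelsValueRecursive : String := ""
def pvRaiseWitnessOut_countVowelsValueRecursive : Int := 0

def Spec_countVowelsValueRecursive (phrase : String) (out : Int) : Prop :=
  out = countVowelsValueRecursive_alt phrase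
instance (phrase : String) (out : Int) : Decidable (Spec_countVowelsValueRecursive phrase out) := by
  unfold Spec_countVowelsValueRecursive; infer_instance

-- ===== CLAIM (what is proved, stated in full; the proofs are below) =====
def Claim_equal_countVowelsValueRecursive : Prop := ∀ (phrase : String), Dom_countVowelsValueRecursive phrase → Pre_countVowelsValueRecursive phrase → Spec_countVowelsValueRecursive phrase (countVowelsValueRecursive phrase)

def Claim_raises_countVowelsValueRecursive : Prop := (∀ (phrase : String), Dom_countVowelsValueRecursive phrase → Raises_countVowelsValueRecursive phrase → ¬ Pre_countVowelsValueRecursive phrase) ∧ (Dom_countVowelsValueRecursive (pvRaiseWitness_countVowelsValueRecursive) ∧ Raises_countVowelsValueRecursive (pvRaiseWitness_countVowelsValueRecursive) ∧ countVowelsValueRecursive_alt (pvRaiseWitness_countVowelsValueRecursive) = pvRaiseWitnessOut_countVowelsValueRecursive)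

-- ===== LEMMAS AND PROOFS =====

theorem pv_lowerChar_idem (c : Char) :
    PySem.Chars.lowerChar (PySem.Chars.lowerChar c) = PySem.Chars.lowerChar c := by
  unfold PySem.Chars.lowerChar PySem.Chars.isupper
  split_ifs with h1 h2 <;> try rfl
  exfalso
  simp only [Bool.and_eq_true, decide_eq_true_eq, Char.le_def] at h1 h2
  obtain ⟨a1, b1⟩ := h1
  obtain ⟨a2, b2⟩ := h2
  have hv : c.toNat ≤ 90 := by exact_mod_cast b1
  have hv2 : 65 ≤ c.toNat := by exact_mod_cast a1
  have hvc : (c.toNat + 32).isValidChar := Or.inl (by omega)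
  have hval : (Char.ofNat (c.toNat + 32)).toNat = c.toNat + 32 := by
    rw [Char.toNat_ofNat, if_pos hvc]
  have hb2 : (Char.ofNat (c.toNat + 32)).toNat ≤ 90 := by exact_mod_cast b2
  omega

theorem pv_lower_idem (cs : List Char) :
    PySem.Chars.lower (PySem.Chars.lower cs) = PySem.Chars.lower cs := by
  simp [PySem.Chars.lower, List.map_map, Function.comp_def, pv_lowerChar_idem]

-- per-character agreement of A's vowel-list scan with B's dict lookup
theorem pv_val_eq (c : Char) :
    (if pvVowelsArr.contains c then ((PySem.List.index? pvVowelsArr c).getD 0 : Int) + 1 else 0)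
      = PySem.Dict.getD pvVals c 0 := by
  by_cases h1 : c = 'a'; · subst h1; decide
  by_cases h2 : c = 'e'; · subst h2; decide
  by_cases h3 : c = 'i'; · subst h3; decide
  by_cases h4 : c = 'o'; · subst h4; decide
  by_cases h5 : c = 'u'; · subst h5; decide
  have hc : pvVowelsArr.contains c = false := by
    simp [pvVowelsArr, h1, h2, h3, h4, h5]
  have he : pvVals = PySem.Dict.mk [('a', 1), ('e', 2), ('i', 3), ('o', 4), ('u', 5)] := by decide
  rw [hc, he]
  simp [PySem.Dict.getD_eq_get?_getD, beq_iff_eq, PySem.Dict.get?,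
        Ne.symm h1, Ne.symm h2, Ne.symm h3, Ne.symm h4, Ne.symm h5]

-- unfolding lemmas for pvGoA (the dependent match blocks direct rewriting)
theorem pvGoA_nil (cs : List Char) (h : PySem.Chars.lower cs = []) : pvGoA cs = 0 := by
  rw [pvGoA]
  split
  · rfl
  · rename_i h'; rw [h] at h'; cases h'

theorem pvGoA_unfold (cs : List Char) (c : Char) (rest : List Char)
    (h : PySem.Chars.lower cs = c :: rest) :
    pvGoA cs =
      if 1 < (c :: rest).length then
        if pvVowelsArr.contains c then
          pvGoA rest + ((PySem.List.index? pvVowelsArr c).getD 0 : Int) + 1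
        else pvGoA rest
      else
        if pvVowelsArr.contains c then ((PySem.List.index? pvVowelsArr c).getD 0 : Int) + 1
        else 0 := by
  rw [pvGoA]
  split
  · simp_all
  · rename_i c' rest' h'
    rw [h] at h'
    cases h'
    rfl

-- A's recursion computes the sum of the per-character values over the lowercased list
theorem pv_goA_eq (cs : List Char) :
    pvGoA cs = ((PySem.Chars.lower cs).map (fun c => PySem.Dict.getD pvVals c 0)).sum := by
  cases hm : PySem.Chars.lower cs with
  | nil => rw [pvGoA_nil cs hm]; simp
  | cons c rest =>
    have hlen : rest.length < cs.length := by
      have := congrArg List.length hm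
      rw [pv_length_lower] at this
      simp at this
      omega
    have hrest : PySem.Chars.lower rest = rest := by
      have := pv_lower_idem cs
      rw [hm] at this
      simpa [PySem.Chars.lower] using congrArg List.tail this
    have ih := pv_goA_eq rest
    rw [pvGoA_unfold cs c rest hm, ih, hrest]
    simp only [List.map_cons, List.sum_cons]
    rw [← pv_val_eq c]
    split_ifs with hl hv hv
    · ring
    · ring
    · have hr : rest = [] := by
        cases rest with
        | nil => rfl
        | cons x xs => exfalso; apply hl; simp
      subst hr; simp
    · have hr : rest = [] := by
        cases rest with
        | nil => rfl
        | cons x xs => exfalso; apply hl; simp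
      subst hr; simp
termination_by cs.length

-- ===== VERDICT (by name: the statement is the Claim_ definition above) =====
theorem countVowelsValueRecursive_spec : Claim_equal_countVowelsValueRecursive := by
  intro phrase _ _
  unfold Spec_countVowelsValueRecursive countVowelsValueRecursive countVowelsValueRecursive_alt
  rw [pv_goA_eq]
  rw [PySem.List.foldl_add]
  simp [PySem.Str.lower]

theorem countVowelsValueRecursive_raises : Claim_raises_countVowelsValueRecursive := by
  unfold Claim_raises_countVowelsValueRecursive
  exact ⟨fun p _ hr hp => hp hr, by decide⟩

-- self-check: the raise-witness value certified by countVowelsValueRecursive_raises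
theorem pv_raise_witness_ok :
    countVowelsValueRecursive_alt pvRaiseWitness_countVowelsValueRecursive
      = pvRaiseWitnessOut_countVowelsValueRecursive := by
  have h := countVowelsValueRecursive_raises
  unfold Claim_raises_countVowelsValueRecursive at h
  exact h.2.2.2
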